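-- pv_equiv track=rewrite | github.com/mikeee-anderson/COMPSCI-101 | COMPSCI-101/CS101/Lab 17/Question 7.py | get_one_d_unique_list
-- ===== SOURCE A (Python) =====
-- def get_one_d_unique_list(list_of_lists):
--     unique_list = []
--     for list in list_of_lists:
--         for number in list:
--             if number not in unique_list:
--                 unique_list.append(number)
--     unique_list.sort()
--     return unique_list
-- ===== SOURCE B (Python) =====
-- def get_one_d_unique_list(list_of_lists):
--     flat = []
--     for lst in list_of_lists:
--         flat += lst
--     flat.sort()
--     result = []
--     for n in flat:
--         if not result or result[-1] != n:
--             result.append(n)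
--     return result
-- ===== Notes on version B (the rewrite author's own statement) =====
-- stated objective: faster
-- what changed: Replaces the O(n) membership scan per element (unique-while-inserting, then sort) by flatten + one sort + a single linear adjacent-dedup pass that only compares against the last kept value.
import Mathlib
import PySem

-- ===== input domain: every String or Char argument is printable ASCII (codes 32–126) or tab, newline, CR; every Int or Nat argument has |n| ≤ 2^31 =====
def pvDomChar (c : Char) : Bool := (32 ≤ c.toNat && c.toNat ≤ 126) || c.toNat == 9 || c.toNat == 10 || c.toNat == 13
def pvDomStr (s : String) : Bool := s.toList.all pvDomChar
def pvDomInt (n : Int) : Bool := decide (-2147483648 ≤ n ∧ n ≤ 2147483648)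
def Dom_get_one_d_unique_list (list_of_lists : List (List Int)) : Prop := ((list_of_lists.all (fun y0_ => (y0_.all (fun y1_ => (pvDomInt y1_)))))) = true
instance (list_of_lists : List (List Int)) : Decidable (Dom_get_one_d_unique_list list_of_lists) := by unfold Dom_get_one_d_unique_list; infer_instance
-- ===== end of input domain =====

-- B replaces A's per-element membership scan (then sort) by flatten + one sort + a single
-- adjacent-dedup pass; return values proved equal on all inputs.


-- ===== PORT A =====
-- ===== PORT A =====
-- A: collect each number into unique_list unless already present, then sort.
def get_one_d_unique_list (list_of_lists : List (List Int)) : List Int :=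
  let unique_list := list_of_lists.foldl
    (fun acc l => l.foldl (fun acc n => if n ∈ acc then acc else acc ++ [n]) acc) []
  PySem.List.sorted unique_list (fun x => x) false

-- ===== PORT B =====
-- B: flatten (flat += lst), sort once, then a single adjacent-dedup pass
-- comparing each value against the last appended one (result[-1]).
def pvDedupGo (result : List Int) : List Int → List Int
  | [] => result
  | n :: rest =>
      if result.getLast? = some n then pvDedupGo result rest
      else pvDedupGo (result ++ [n]) rest

def get_one_d_unique_list_alt (list_of_lists : List (List Int)) : List Int :=
  let flat := list_of_lists.foldl (fun acc lst => acc ++ lst) []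
  let s := PySem.List.sorted flat (fun x => x) false
  pvDedupGo [] s

-- ===== PRECONDITION & SPEC =====
def Spec_get_one_d_unique_list (list_of_lists : List (List Int)) (out : List Int) : Prop := out = get_one_d_unique_list_alt list_of_lists
instance (list_of_lists : List (List Int)) (out : List Int) : Decidable (Spec_get_one_d_unique_list list_of_lists out) := by unfold Spec_get_one_d_unique_list; infer_instance

-- ===== CLAIM (what is proved, stated in full; the proofs are below) =====
def Claim_equal_get_one_d_unique_list : Prop := ∀ (list_of_lists : List (List Int)), Dom_get_one_d_unique_list list_of_lists → Spec_get_one_d_unique_list list_of_lists (get_one_d_unique_list list_of_lists)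

-- ===== LEMMAS AND PROOFS =====

-- ---- A side: the unique_list accumulator ----
theorem mem_innerFold (l : List Int) (acc : List Int) (x : Int) :
    x ∈ l.foldl (fun acc n => if n ∈ acc then acc else acc ++ [n]) acc ↔ x ∈ acc ∨ x ∈ l := by
  induction l generalizing acc with
  | nil => simp
  | cons n rest ih =>
      simp only [List.foldl_cons]
      by_cases h : n ∈ acc
      · simp only [if_pos h, ih]
        constructor
        · rintro (hx | hx)
          · exact Or.inl hx
          · exact Or.inr (List.mem_cons_of_mem _ hx)
        · rintro (hx | hx)
          · exact Or.inl hx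
          · rcases List.mem_cons.mp hx with rfl | hx
            · exact Or.inl h
            · exact Or.inr hx
      · simp only [if_neg h, ih, List.mem_append, List.mem_cons]
        tauto

theorem nodup_innerFold (l : List Int) (acc : List Int) (h : acc.Nodup) :
    (l.foldl (fun acc n => if n ∈ acc then acc else acc ++ [n]) acc).Nodup := by
  induction l generalizing acc with
  | nil => simpa using h
  | cons n rest ih =>
      simp only [List.foldl_cons]
      by_cases hn : n ∈ acc
      · rw [if_pos hn]; exact ih _ h
      · rw [if_neg hn]
        refine ih _ ?_
        rw [List.nodup_append]
        refine ⟨h, List.nodup_singleton n, ?_⟩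
        intro a ha b hb
        have hbn : b = n := List.mem_singleton.mp hb
        subst hbn
        exact fun hEq => hn (hEq ▸ ha)

theorem mem_outerFold (L : List (List Int)) (acc : List Int) (x : Int) :
    x ∈ L.foldl (fun acc l => l.foldl (fun acc n => if n ∈ acc then acc else acc ++ [n]) acc) acc
      ↔ x ∈ acc ∨ ∃ l ∈ L, x ∈ l := by
  induction L generalizing acc with
  | nil => simp
  | cons l rest ih =>
      simp only [List.foldl_cons, ih, mem_innerFold, List.mem_cons]
      constructor
      · rintro ((h | h) | ⟨l', hl', hx⟩)
        · exact Or.inl h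
        · exact Or.inr ⟨l, Or.inl rfl, h⟩
        · exact Or.inr ⟨l', Or.inr hl', hx⟩
      · rintro (h | ⟨l', (rfl | hl'), hx⟩)
        · exact Or.inl (Or.inl h)
        · exact Or.inl (Or.inr hx)
        · exact Or.inr ⟨l', hl', hx⟩

theorem nodup_outerFold (L : List (List Int)) (acc : List Int) (h : acc.Nodup) :
    (L.foldl (fun acc l => l.foldl (fun acc n => if n ∈ acc then acc else acc ++ [n]) acc) acc).Nodup := by
  induction L generalizing acc with
  | nil => simpa using h
  | cons l rest ih => exact ih _ (nodup_innerFold l acc h)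

-- ---- B side: flatten ----
theorem foldl_append_flatten (L : List (List Int)) (acc : List Int) :
    L.foldl (fun acc lst => acc ++ lst) acc = acc ++ L.flatten := by
  induction L generalizing acc with
  | nil => simp
  | cons l rest ih => simp [List.foldl_cons, ih]

-- ---- B side: the adjacent-dedup pass ----
theorem pvDedupGo_append (l : List Int) (acc : List Int) (a : Int) :
    pvDedupGo (acc ++ [a]) l = acc ++ pvDedupGo [a] l := by
  induction l generalizing acc a with
  | nil => simp [pvDedupGo]
  | cons n rest ih =>
      simp only [pvDedupGo, List.getLast?_append, List.getLast?_singleton, Option.some_or]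
      by_cases h : a = n
      · subst h; simp [ih]
      · have hne : ¬ ((some a : Option Int) = some n) := by simpa using h
        rw [if_neg hne, if_neg hne, ih (acc ++ [a]) n, ih [a] n, List.append_assoc]

theorem pvDedupGo_one_cons (a n : Int) (rest : List Int) :
    pvDedupGo [a] (n :: rest) =
      if a = n then pvDedupGo [a] rest else a :: pvDedupGo [n] rest := by
  by_cases h : a = n
  · simp [pvDedupGo, h]
  · have hstep : pvDedupGo ([a] ++ [n]) rest = [a] ++ pvDedupGo [n] rest :=
      pvDedupGo_append rest [a] n
    simp only [pvDedupGo, List.getLast?_singleton, Option.some.injEq, if_neg h]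
    simpa using hstep

theorem mem_pvDedupGo_one (l : List Int) (a x : Int) :
    x ∈ pvDedupGo [a] l ↔ x = a ∨ x ∈ l := by
  induction l generalizing a with
  | nil => simp [pvDedupGo]
  | cons n rest ih =>
      rw [pvDedupGo_one_cons]
      by_cases h : a = n
      · subst h
        rw [if_pos rfl, ih, List.mem_cons]
        tauto
      · rw [if_neg h]
        simp only [List.mem_cons, ih]

theorem pairwise_pvDedupGo_one (l : List Int) (a : Int)
    (h : (a :: l).Pairwise (· ≤ ·)) :
    (pvDedupGo [a] l).Pairwise (· < ·) := by
  induction l generalizing a with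
  | nil => simp [pvDedupGo]
  | cons n rest ih =>
      rw [pvDedupGo_one_cons]
      rcases List.pairwise_cons.mp h with ⟨ha, htail⟩
      rcases List.pairwise_cons.mp htail with ⟨hn, hrest⟩
      by_cases han : a = n
      · rw [if_pos han]
        exact ih a (List.pairwise_cons.mpr
          ⟨fun b hb => ha b (List.mem_cons_of_mem _ hb), hrest⟩)
      · rw [if_neg han]
        refine List.pairwise_cons.mpr ⟨?_, ih n htail⟩
        intro b hb
        have haln : a < n := lt_of_le_of_ne (ha n List.mem_cons_self) han
        rcases (mem_pvDedupGo_one rest n b).mp hb with rfl | hb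
        · exact haln
        · exact lt_of_lt_of_le haln (hn b hb)

theorem pvDedupGo_nil_props (s : List Int) (hps : s.Pairwise (· ≤ ·)) :
    (∀ x, x ∈ pvDedupGo [] s ↔ x ∈ s) ∧ (pvDedupGo [] s).Pairwise (· < ·) := by
  cases s with
  | nil => simp [pvDedupGo]
  | cons a rest =>
      have h0 : pvDedupGo [] (a :: rest) = pvDedupGo [a] rest := by
        simp [pvDedupGo]
      exact ⟨fun x => by rw [h0, mem_pvDedupGo_one, List.mem_cons],
             by rw [h0]; exact pairwise_pvDedupGo_one rest a hps⟩

-- ===== VERDICT (by name: the statement is the Claim_ definition above) =====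
theorem get_one_d_unique_list_spec : Claim_equal_get_one_d_unique_list := by
  intro L _
  unfold Spec_get_one_d_unique_list get_one_d_unique_list get_one_d_unique_list_alt
  simp only [foldl_append_flatten, List.nil_append]
  set u := L.foldl (fun acc l => l.foldl (fun acc n => if n ∈ acc then acc else acc ++ [n]) acc) [] with hu
  have hmemu : ∀ x, x ∈ u ↔ ∃ l ∈ L, x ∈ l := by
    intro x; rw [hu, mem_outerFold]; simp
  have hnodu : u.Nodup := nodup_outerFold L [] List.nodup_nil
  have hps : (PySem.List.sorted L.flatten (fun x => x) false).Pairwise (· ≤ ·) := by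
    have := PySem.List.sorted_pairwise (xs := L.flatten) (key := fun x : Int => x)
    simpa using this
  obtain ⟨hbm, hbp⟩ := pvDedupGo_nil_props _ hps
  have hbn : (pvDedupGo [] (PySem.List.sorted L.flatten (fun x => x) false)).Nodup :=
    hbp.imp (fun h => ne_of_lt h)
  have hperm : (pvDedupGo [] (PySem.List.sorted L.flatten (fun x => x) false)).Perm u := by
    rw [List.perm_ext_iff_of_nodup hbn hnodu]
    intro x
    rw [hbm x, PySem.List.mem_sorted, List.mem_flatten, hmemu x]
  exact PySem.List.sorted_eq_of_perm_of_pairwise_lt u _ (fun x : Int => x) hperm (by simpa using hbp)
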